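-- pv_equiv track=rewrite | github.com/Roonil03/ThirdYearCodes | IS/Lab1/vigAutokey.py | autokey_dec
-- ===== SOURCE A (Python) =====
-- import string
--
-- alpha = string.ascii_lowercase
--
-- m = 26
--
-- def autokey_dec(cipher, key_shift):
--     plain = []
--     prev = key_shift
--     for c in cipher:
--         pi = alpha[(alpha.index(c) - prev) % m]
--         plain.append(pi)
--         prev = alpha.index(pi)
--     return "".join(plain)
-- ===== SOURCE B (Python) =====
-- import string
--
-- alpha = string.ascii_lowercase
--
-- m = 26
--
-- def autokey_dec(cipher, key_shift):
--     # Closed form of the autokey recurrence: d_i = (-1)^i * (A_i - key_shift) mod 26,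
--     # where A_i is the alternating prefix sum of cipher letter indices.
--     # Three staged passes: letters -> indices, indices -> signed residual values, values -> letters.
--     idxs = [alpha.index(c) for c in cipher]
--     vals = []
--     acc = 0
--     sign = 1
--     for x in idxs:
--         acc += sign * x
--         vals.append(sign * (acc - key_shift))
--         sign = -sign
--     return "".join(alpha[v % m] for v in vals)
-- ===== Notes on version B (the rewrite author's own statement) =====
-- stated objective: alternative
-- what changed: Replaces A's single loop carrying the previous plaintext letter with the closed form d_i = (-1)^i*(A_i - key_shift) mod 26 over the alternating prefix sum A_i, computed in three staged passes (letters to indices, indices to signed residuals, residuals to letters) with no re-indexing of emitted letters.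
import Mathlib
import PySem

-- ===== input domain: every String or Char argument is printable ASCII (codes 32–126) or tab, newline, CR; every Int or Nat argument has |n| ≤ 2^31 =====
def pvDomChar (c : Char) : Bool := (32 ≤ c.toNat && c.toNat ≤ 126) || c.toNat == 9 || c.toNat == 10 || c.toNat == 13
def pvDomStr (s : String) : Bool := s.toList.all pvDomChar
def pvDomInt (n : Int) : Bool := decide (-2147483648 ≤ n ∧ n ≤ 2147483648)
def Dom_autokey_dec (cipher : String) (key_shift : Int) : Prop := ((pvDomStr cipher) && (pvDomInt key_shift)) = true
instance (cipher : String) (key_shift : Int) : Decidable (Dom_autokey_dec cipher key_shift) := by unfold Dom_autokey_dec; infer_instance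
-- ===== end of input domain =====

-- B replaces A's prev-plaintext loop with a staged closed-form pipeline (indices, alternating prefix residuals, letters); same cost.


-- ===== PORT A =====
-- alpha = string.ascii_lowercase
def pvAlpha : List Char := "abcdefghijklmnopqrstuvwxyz".toList
-- alpha.index(c) (returns 26 where Python raises ValueError; such inputs are outside Pre_)
def pvAlphaIdx (c : Char) : Int := (pvAlpha.findIdx (· == c) : Int)
-- alpha[n % 26]
def pvAlphaAt (n : Int) : Char := pvAlpha.getD (n.emod 26).toNat 'a'

def autokey_dec (cipher : String) (key_shift : Int) : String :=
  let st := cipher.toList.foldl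
    (fun (st : List Char × Int) c =>
      let pi := pvAlphaAt (pvAlphaIdx c - st.2)
      (st.1 ++ [pi], pvAlphaIdx pi))
    ([], key_shift)
  String.ofList st.1

-- ===== PORT B =====
-- second pass of Source B: the signed residual values sign*(acc'-k), one per index
def pvVals : List Int → Int → Int → Int → List Int
  | [], _, _, _ => []
  | x :: t, k, sign, acc =>
    let acc' := acc + sign * x
    sign * (acc' - k) :: pvVals t k (-sign) acc'

def autokey_dec_alt (cipher : String) (key_shift : Int) : String :=
  String.ofList ((pvVals (cipher.toList.map pvAlphaIdx) key_shift 1 0).map pvAlphaAt)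

-- ===== PRECONDITION & SPEC =====
-- Pre_ excludes exactly the inputs on which Python A raises ValueError: any character not in 'a'..'z'.
def Pre_autokey_dec (cipher : String) (_key_shift : Int) : Prop :=
  cipher.toList.all (fun c => 'a' ≤ c && c ≤ 'z') = true
instance (cipher : String) (key_shift : Int) : Decidable (Pre_autokey_dec cipher key_shift) := by
  unfold Pre_autokey_dec; infer_instance
def pvWitness_autokey_dec : String × Int := ("hello", 3)

def Spec_autokey_dec (cipher : String) (key_shift : Int) (out : String) : Prop := out = autokey_dec_alt cipher key_shift
instance (cipher : String) (key_shift : Int) (out : String) : Decidable (Spec_autokey_dec cipher key_shift out) := by unfold Spec_autokey_dec; infer_instance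

-- ===== CLAIM (what is proved, stated in full; the proofs are below) =====
def Claim_equal_autokey_dec : Prop := ∀ (cipher : String) (key_shift : Int), Dom_autokey_dec cipher key_shift → Pre_autokey_dec cipher key_shift → Spec_autokey_dec cipher key_shift (autokey_dec cipher key_shift)

-- ===== LEMMAS AND PROOFS =====

-- alpha.index(alpha[n]) = n for 0 ≤ n < 26
lemma pvAlphaIdx_at (n : Int) (h0 : 0 ≤ n) (h1 : n < 26) :
    pvAlphaIdx (pvAlpha.getD n.toNat 'a') = n := by
  interval_cases n <;> decide

lemma pvAlphaIdx_alphaAt (n : Int) : pvAlphaIdx (pvAlphaAt n) = n.emod 26 := by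
  unfold pvAlphaAt
  exact pvAlphaIdx_at _ (Int.emod_nonneg _ (by decide)) (Int.emod_lt_of_pos _ (by decide))

lemma pvAlphaAt_congr {a b : Int} (h : a.emod 26 = b.emod 26) : pvAlphaAt a = pvAlphaAt b := by
  unfold pvAlphaAt; rw [h]

lemma emod26_sub_congr {a b : Int} (h : a.emod 26 = b.emod 26) (z : Int) :
    (z - a).emod 26 = (z - b).emod 26 := by
  have h' : a % 26 = b % 26 := h
  show (z - a) % 26 = (z - b) % 26
  omega

lemma emod26_emod26 (n : Int) : (n.emod 26).emod 26 = n.emod 26 :=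
  Int.emod_emod_of_dvd n (dvd_refl 26)

-- Loop invariant: A's fold, started with output 'out' and previous value 'prev', appends
-- exactly the letters of B's residual list, provided prev ≡ -sign*(acc - k) (mod 26).
lemma loop_agree (k : Int) (l : List Char) :
    ∀ (out : List Char) (prev sign acc : Int),
      (sign = 1 ∨ sign = -1) →
      prev.emod 26 = (-sign * (acc - k)).emod 26 →
      (l.foldl
        (fun (st : List Char × Int) c =>
          let pi := pvAlphaAt (pvAlphaIdx c - st.2)
          (st.1 ++ [pi], pvAlphaIdx pi))
        (out, prev)).1 =
      out ++ (pvVals (l.map pvAlphaIdx) k sign acc).map pvAlphaAt := by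
  induction l with
  | nil => intro out prev sign acc _ _; simp [pvVals]
  | cons c t ih =>
    intro out prev sign acc hs hinv
    simp only [List.foldl_cons, List.map_cons, pvVals]
    have hmod : (pvAlphaIdx c - prev).emod 26
        = (sign * (acc + sign * pvAlphaIdx c - k)).emod 26 := by
      rcases hs with h | h <;> subst h <;>
      · simp only [neg_mul, one_mul, neg_neg, neg_sub] at hinv ⊢
        rw [emod26_sub_congr hinv]
        congr 1
        ring
    have hchar : pvAlphaAt (pvAlphaIdx c - prev)
        = pvAlphaAt (sign * (acc + sign * pvAlphaIdx c - k)) := pvAlphaAt_congr hmod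
    have hs' : (-sign = 1 ∨ -sign = -1) := by rcases hs with h | h <;> subst h <;> simp
    have hinv' : (pvAlphaIdx (pvAlphaAt (pvAlphaIdx c - prev))).emod 26
        = (-(-sign) * (acc + sign * pvAlphaIdx c - k)).emod 26 := by
      rw [pvAlphaIdx_alphaAt, neg_neg, emod26_emod26]
      exact hmod
    rw [ih (out ++ [pvAlphaAt (pvAlphaIdx c - prev)]) _ (-sign)
        (acc + sign * pvAlphaIdx c) hs' hinv']
    simp [hchar]

-- ===== VERDICT (by name: the statement is the Claim_ definition above) =====
theorem autokey_dec_spec : Claim_equal_autokey_dec := by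
  intro cipher key_shift _ _
  unfold Spec_autokey_dec autokey_dec autokey_dec_alt
  simp only []
  congr 1
  have := loop_agree key_shift cipher.toList [] key_shift 1 0 (Or.inl rfl) (by simp)
  simpa using this
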